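-- pv_equiv track=rewrite | github.com/SlyyCooper/OpenCrawl | opencrawl.py | build_markdown_site_map
-- ===== SOURCE A (Python) =====
-- def build_markdown_site_map(base_url, adjacency):
--     lines = [f"# Site Map for {base_url}\n"]
--     visited_nodes = set()
--
--     def build_submap(url, level=0):
--         if url in visited_nodes:
--             return
--         visited_nodes.add(url)
--
--         indent = "  " * level
--         lines.append(f"{indent}- {url}")
--
--         children = sorted(adjacency.get(url, []))
--         for child_url in children:
--             build_submap(child_url, level + 1)
--
--     build_submap(base_url)
--     return "\n".join(lines)
-- ===== SOURCE B (Python) =====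
-- def build_markdown_site_map(base_url, adjacency):
--     lines = [f"# Site Map for {base_url}\n"]
--     visited_nodes = set()
--     stack = [(base_url, 0)]
--     while stack:
--         url, level = stack.pop()
--         if url in visited_nodes:
--             continue
--         visited_nodes.add(url)
--         lines.append(f"{'  ' * level}- {url}")
--         # push children in descending order so the LIFO stack pops them ascending
--         for child_url in sorted(adjacency.get(url, []), reverse=True):
--             stack.append((child_url, level + 1))
--     return "\n".join(lines)
-- ===== Notes on version B (the rewrite author's own statement) =====
-- stated objective: alternative
-- what changed: The recursive DFS helper with a closure over shared state is replaced by an iterative loop over an explicit stack of (url, level) pairs, seeded with (base_url, 0), marking nodes visited at pop time and pushing children reverse-sorted so the LIFO order reproduces the same pre-order traversal.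
import Mathlib
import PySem

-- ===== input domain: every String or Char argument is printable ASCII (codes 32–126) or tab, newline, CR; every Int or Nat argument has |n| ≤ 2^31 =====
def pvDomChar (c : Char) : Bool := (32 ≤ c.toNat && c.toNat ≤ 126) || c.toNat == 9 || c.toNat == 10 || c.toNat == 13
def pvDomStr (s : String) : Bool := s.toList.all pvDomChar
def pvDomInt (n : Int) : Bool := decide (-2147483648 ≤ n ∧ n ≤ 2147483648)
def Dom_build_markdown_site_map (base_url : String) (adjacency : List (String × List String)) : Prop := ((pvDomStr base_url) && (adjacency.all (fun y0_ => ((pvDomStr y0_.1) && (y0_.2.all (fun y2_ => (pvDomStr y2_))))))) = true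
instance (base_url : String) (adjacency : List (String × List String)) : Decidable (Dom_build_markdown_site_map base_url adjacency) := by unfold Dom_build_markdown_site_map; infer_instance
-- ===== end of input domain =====

-- B replaces A's recursive DFS helper by an explicit stack of (url, level) pairs
-- (visited checked at pop time, children pushed reverse-sorted): same output, no call-stack recursion.


-- ===== PORT A =====
-- shared formatting helper: the line f"{'  '*level}- {url}" (both Pythons build the identical f-string)
def pvLine (url : String) (level : Nat) : String :=
  PySem.Str.join "" (List.replicate level "  ") ++ "- " ++ url

-- the inner recursive helper build_submap; state = (visited_nodes, lines).
-- The fuel argument is an artifact of the Lean encoding only: each nested call adds a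
-- previously-unvisited url to visited_nodes, so the recursion depth never exceeds
-- 1 + (number of candidate urls), the fuel build_markdown_site_map supplies.
def pvGoA (adj : List (String × List String)) :
    Nat → String → Nat → (PySem.Set String × List String) → (PySem.Set String × List String)
  | 0, _, _, st => st
  | f + 1, url, level, st =>
    if PySem.Set.contains st.1 url then st
    else
      let st1 := (PySem.Set.add st.1 url, st.2 ++ [pvLine url level])
      (PySem.List.sorted (PySem.Dict.getD ⟨adj⟩ url []) (fun x => x) false).foldl
        (fun st c => pvGoA adj f c (level + 1) st) st1

def build_markdown_site_map (base_url : String) (adjacency : List (String × List String)) : String :=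
  let fuel := (base_url :: adjacency.flatMap (·.2)).length + 1
  let st := pvGoA adjacency fuel base_url 0 (PySem.Set.empty, ["# Site Map for " ++ base_url ++ "\n"])
  PySem.Str.join "\n" st.2

-- ===== PORT B =====
-- the while-stack loop; Python's stack grows at the list's end and pops from the end,
-- modelled with the list HEAD as the top of the stack (so append = cons, pop = uncons).
-- The fuel is an artifact of the Lean encoding: every iteration pops one entry, and at most
-- 1 + sum of all children-list lengths entries are ever pushed, the bound supplied below.
def pvGoB (adj : List (String × List String)) :
    Nat → List (String × Nat) → PySem.Set String → List String → List String
  | 0, _, _, lines => lines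
  | _ + 1, [], _, lines => lines
  | f + 1, (url, level) :: stk, vis, lines =>
    if PySem.Set.contains vis url then pvGoB adj f stk vis lines
    else
      let vis1 := PySem.Set.add vis url
      let lines1 := lines ++ [pvLine url level]
      let stk1 := (PySem.List.sorted (PySem.Dict.getD ⟨adj⟩ url []) (fun x => x) true).foldl
        (fun s c => (c, level + 1) :: s) stk
      pvGoB adj f stk1 vis1 lines1

def build_markdown_site_map_alt (base_url : String) (adjacency : List (String × List String)) : String :=
  let cand := base_url :: adjacency.flatMap (·.2)
  let fuel := 2 + (cand.map (fun u => (PySem.Dict.getD ⟨adjacency⟩ u []).length)).sum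
  PySem.Str.join "\n"
    (pvGoB adjacency fuel [(base_url, 0)] PySem.Set.empty ["# Site Map for " ++ base_url ++ "\n"])

-- ===== PRECONDITION & SPEC =====
def Spec_build_markdown_site_map (base_url : String) (adjacency : List (String × List String)) (out : String) : Prop := out = build_markdown_site_map_alt base_url adjacency
instance (base_url : String) (adjacency : List (String × List String)) (out : String) : Decidable (Spec_build_markdown_site_map base_url adjacency out) := by unfold Spec_build_markdown_site_map; infer_instance

-- ===== CLAIM (what is proved, stated in full; the proofs are below) =====
def Claim_equal_build_markdown_site_map : Prop := ∀ (base_url : String) (adjacency : List (String × List String)), Dom_build_markdown_site_map base_url adjacency → Spec_build_markdown_site_map base_url adjacency (build_markdown_site_map base_url adjacency)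

-- ===== LEMMAS AND PROOFS =====

-- number of still-unvisited entries of the candidate list S
def pvU (S : List String) (vis : PySem.Set String) : Nat :=
  (S.filter (fun u => !PySem.Set.contains vis u)).length

-- pending future pushes: total children length over unvisited candidates
def pvP (adj : List (String × List String)) (S : List String) (vis : PySem.Set String) : Nat :=
  ((S.filter (fun u => !PySem.Set.contains vis u)).map
    (fun u => (PySem.Dict.getD ⟨adj⟩ u []).length)).sum

theorem pv_getD_mem_flatMap (adj : List (String × List String)) (u c : String)
    (h : c ∈ PySem.Dict.getD ⟨adj⟩ u []) : c ∈ adj.flatMap (·.2) := by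
  unfold PySem.Dict.getD PySem.Dict.get? at h
  cases hf : List.find? (fun p => p.1 == u) (PySem.Dict.items ⟨adj⟩) with
  | none => rw [hf] at h; simp at h
  | some p =>
    rw [hf] at h; simp at h
    exact List.mem_flatMap.2 ⟨p, List.mem_of_find?_eq_some hf, h⟩

theorem pv_not_mem_of_contains_false {vis : PySem.Set String} {url : String}
    (hc : PySem.Set.contains vis url = false) : url ∉ vis :=
  fun h => by rw [show PySem.Set.contains vis url = List.contains vis url from rfl,
                  List.contains_iff_mem.mpr h] at hc; cases hc

theorem pv_mem_add_of {s : PySem.Set String} {x y : String}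
    (h : PySem.Set.contains s y = true) : PySem.Set.contains (PySem.Set.add s x) y = true := by
  simp only [PySem.Set.contains, List.contains_iff_mem] at *
  exact (PySem.Set.mem_add s x y).2 (Or.inl h)

theorem pv_contains_add_eq (vis : PySem.Set String) (url : String)
    (hc : PySem.Set.contains vis url = false) (u : String) :
    (!PySem.Set.contains (PySem.Set.add vis url) u)
      = ((!PySem.Set.contains vis u) && !(u == url)) := by
  by_cases hu : u = url
  · subst hu
    have h2 : PySem.Set.contains (PySem.Set.add vis u) u = true := by
      simp only [PySem.Set.add, PySem.Set.contains, List.contains_iff_mem]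
      split <;> simp_all
    rw [h2, hc]; simp
  · have h2 : PySem.Set.contains (PySem.Set.add vis url) u = PySem.Set.contains vis u := by
      simp only [PySem.Set.add]
      split
      · rfl
      · show List.contains (vis ++ [url]) u = List.contains vis u
        rw [List.contains_eq_mem, List.contains_eq_mem]
        simp [hu]
    rw [h2, show (u == url) = false by simp [hu]]
    simp

theorem pv_length_filter_mono (l : List String) (p q : String → Bool)
    (h : ∀ x, p x = true → q x = true) : (l.filter p).length ≤ (l.filter q).length := by
  induction l with
  | nil => simp
  | cons a t ih =>
    simp only [List.filter_cons]
    by_cases ha : p a = true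
    · rw [if_pos ha, if_pos (h a ha)]; simpa using ih
    · rw [if_neg ha]
      split
      · exact le_trans ih (by simp)
      · exact ih

theorem pv_sum_filter_le (w : String → Nat) (l : List String) (p : String → Bool) :
    ((l.filter p).map w).sum ≤ (l.map w).sum := by
  induction l with
  | nil => simp
  | cons a t ih =>
    simp only [List.filter_cons, List.map_cons, List.sum_cons]
    split
    · simp only [List.map_cons, List.sum_cons]; omega
    · omega

theorem pv_sum_filter_ne (w : String → Nat) :
    ∀ (l : List String) (x : String), x ∈ l →
      ((l.filter (fun y => !(y == x))).map w).sum + w x ≤ (l.map w).sum := by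
  intro l
  induction l with
  | nil => simp
  | cons a t ih =>
    intro x hx
    simp only [List.filter_cons, List.map_cons, List.sum_cons]
    by_cases hax : a = x
    · subst hax
      rw [if_neg (by simp)]
      have := pv_sum_filter_le w t (fun y => !(y == a))
      omega
    · have hxt : x ∈ t := by cases hx with | head => exact absurd rfl hax | tail _ h => exact h
      have := ih x hxt
      rw [if_pos (by simp [hax])]
      simp only [List.map_cons, List.sum_cons]
      omega

theorem pv_length_filter_ne_lt (l : List String) (x : String) (hx : x ∈ l) :
    (l.filter (fun y => !(y == x))).length < l.length := by
  induction l with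
  | nil => cases hx
  | cons a t ih =>
    simp only [List.filter_cons]
    by_cases hax : a = x
    · subst hax
      rw [if_neg (by simp)]
      have := List.length_filter_le (fun y => !(y == a)) t
      simp; omega
    · have hxt : x ∈ t := by cases hx with | head => exact absurd rfl hax | tail _ h => exact h
      rw [if_pos (by simp [hax])]
      have := ih hxt
      simp; omega

theorem pv_filter_add (S : List String) (vis : PySem.Set String) (url : String)
    (hc : PySem.Set.contains vis url = false) :
    S.filter (fun u => !PySem.Set.contains (PySem.Set.add vis url) u)
      = (S.filter (fun u => !PySem.Set.contains vis u)).filter (fun u => !(u == url)) := by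
  rw [List.filter_filter]
  exact List.filter_congr (fun x _ => by rw [pv_contains_add_eq vis url hc x, Bool.and_comm])

theorem pv_mem_filter_unvis (S : List String) (vis : PySem.Set String) (url : String)
    (hm : url ∈ S) (hc : PySem.Set.contains vis url = false) :
    url ∈ S.filter (fun u => !PySem.Set.contains vis u) :=
  List.mem_filter.2 ⟨hm, by simp [pv_not_mem_of_contains_false hc]⟩

theorem pvU_mono (S : List String) (vis vis' : PySem.Set String)
    (h : ∀ x, PySem.Set.contains vis x = true → PySem.Set.contains vis' x = true) :
    pvU S vis' ≤ pvU S vis := by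
  apply pv_length_filter_mono
  intro x hx
  cases hv : PySem.Set.contains vis x
  · simp
  · have h2 := h x hv
    have hx' : (!PySem.Set.contains vis' x) = true := hx
    rw [h2] at hx'
    cases hx' 

theorem pvU_add_lt (S : List String) (vis : PySem.Set String) (url : String)
    (hm : url ∈ S) (hc : PySem.Set.contains vis url = false) :
    pvU S (PySem.Set.add vis url) < pvU S vis := by
  unfold pvU
  rw [pv_filter_add S vis url hc]
  exact pv_length_filter_ne_lt _ url (pv_mem_filter_unvis S vis url hm hc)

theorem pvP_add (adj : List (String × List String)) (S : List String) (vis : PySem.Set String)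
    (url : String) (hm : url ∈ S) (hc : PySem.Set.contains vis url = false) :
    pvP adj S (PySem.Set.add vis url) + (PySem.Dict.getD ⟨adj⟩ url []).length ≤ pvP adj S vis := by
  unfold pvP
  rw [pv_filter_add S vis url hc]
  exact pv_sum_filter_ne _ _ url (pv_mem_filter_unvis S vis url hm hc)

theorem pvGoA_contains_mono (adj : List (String × List String)) :
    ∀ (f : Nat) (url : String) (level : Nat) (st : PySem.Set String × List String) (x : String),
      PySem.Set.contains st.1 x = true →
      PySem.Set.contains (pvGoA adj f url level st).1 x = true := by
  intro f
  induction f with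
  | zero => intro url level st x h; simpa [pvGoA] using h
  | succ f ih =>
    intro url level st x h
    rw [pvGoA]
    split
    · exact h
    · have hfold : ∀ (cs : List String) (st : PySem.Set String × List String),
          PySem.Set.contains st.1 x = true →
          PySem.Set.contains ((cs.foldl (fun st c => pvGoA adj f c (level + 1) st) st)).1 x = true := by
        intro cs
        induction cs with
        | nil => intro st h; exact h
        | cons c cs ihc => intro st h; exact ihc _ (ih c (level+1) st x h)
      exact hfold _ _ (pv_mem_add_of h)

theorem pvGoA_fuel (adj : List (String × List String)) (S : List String)
    (Hcl : ∀ u c, c ∈ PySem.Dict.getD ⟨adj⟩ u [] → c ∈ S) :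
    ∀ (m : Nat) (url : String) (level : Nat) (st : PySem.Set String × List String) (f g : Nat),
      url ∈ S → pvU S st.1 ≤ m → m < f → m < g →
      pvGoA adj f url level st = pvGoA adj g url level st := by
  intro m
  induction m using Nat.strong_induction_on with
  | _ m IH =>
    intro url level st f g hmem hU hf hg
    obtain ⟨f', rfl⟩ : ∃ f', f = f' + 1 := ⟨f - 1, by omega⟩
    obtain ⟨g', rfl⟩ : ∃ g', g = g' + 1 := ⟨g - 1, by omega⟩
    rw [pvGoA, pvGoA]
    by_cases hcv : PySem.Set.contains st.1 url = true
    · rw [if_pos hcv, if_pos hcv]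
    · have hc : PySem.Set.contains st.1 url = false := by
        revert hcv; cases PySem.Set.contains st.1 url <;> simp
      rw [if_neg hcv, if_neg hcv]
      have hlt := pvU_add_lt S st.1 url hmem hc
      have hfold : ∀ (cs : List String), (∀ c ∈ cs, c ∈ S) →
          ∀ (st' : PySem.Set String × List String), pvU S st'.1 ≤ m - 1 →
          cs.foldl (fun st c => pvGoA adj f' c (level + 1) st) st'
            = cs.foldl (fun st c => pvGoA adj g' c (level + 1) st) st' := by
        intro cs
        induction cs with
        | nil => intro _ st' _; rfl
        | cons c cs ihc =>
          intro hcs st' hU'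
          have hhead := IH (m - 1) (by omega) c (level + 1) st' f' g' (hcs c (List.mem_cons_self ..))
            hU' (by omega) (by omega)
          simp only [List.foldl_cons]
          rw [hhead]
          apply ihc (fun x hx => hcs x (List.mem_cons_of_mem _ hx))
          exact le_trans
            (pvU_mono S st'.1 _ (fun x hx => pvGoA_contains_mono adj g' c (level + 1) st' x hx)) hU'
      apply hfold _ (fun c hcm => Hcl url c ((PySem.List.mem_sorted _ _ _ _).1 hcm))
      show pvU S (PySem.Set.add st.1 url) ≤ m - 1
      omega

theorem pvGoA_fuel_foldl (adj : List (String × List String)) (S : List String)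
    (Hcl : ∀ u c, c ∈ PySem.Dict.getD ⟨adj⟩ u [] → c ∈ S) :
    ∀ (cs : List String) (level : Nat) (st : PySem.Set String × List String) (f g m : Nat),
      (∀ c ∈ cs, c ∈ S) → pvU S st.1 ≤ m → m < f → m < g →
      cs.foldl (fun st c => pvGoA adj f c level st) st
        = cs.foldl (fun st c => pvGoA adj g c level st) st := by
  intro cs
  induction cs with
  | nil => intro _ _ _ _ _ _ _ _ _; rfl
  | cons c cs ihc =>
    intro level st f g m hcs hU hf hg
    have hhead := pvGoA_fuel adj S Hcl m c level st f g (hcs c (List.mem_cons_self ..)) hU hf hg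
    simp only [List.foldl_cons]
    rw [hhead]
    apply ihc level _ f g m (fun x hx => hcs x (List.mem_cons_of_mem _ hx)) _ hf hg
    exact le_trans
      (pvU_mono S st.1 _ (fun x hx => pvGoA_contains_mono adj g c level st x hx)) hU

theorem pv_foldl_pairs (adj : List (String × List String)) (N level : Nat) :
    ∀ (cs : List String) (st : PySem.Set String × List String),
      (cs.map (fun c => (c, level + 1))).foldl (fun st p => pvGoA adj N p.1 p.2 st) st
        = cs.foldl (fun st c => pvGoA adj N c (level + 1) st) st := by
  intro cs
  induction cs with
  | nil => intro st; rfl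
  | cons c cs ihc => intro st; simp only [List.map_cons, List.foldl_cons]; rw [ihc]

theorem pv_push_foldl (level : Nat) :
    ∀ (cs : List String) (stk : List (String × Nat)),
      cs.foldl (fun s c => (c, level + 1) :: s) stk
        = cs.reverse.map (fun c => (c, level + 1)) ++ stk := by
  intro cs
  induction cs with
  | nil => intro stk; simp
  | cons c cs ihc => intro stk; simp [List.foldl_cons, ihc]

theorem pv_sorted_rev_reverse (xs : List String) :
    (PySem.List.sorted xs (fun x => x) true).reverse = PySem.List.sorted xs (fun x => x) false := by
  apply List.Perm.eq_of_pairwise (le := (· ≤ ·)) (fun a b _ _ h1 h2 => le_antisymm h1 h2)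
  · exact List.pairwise_reverse.2 (by simpa using PySem.List.sorted_pairwise_rev xs (fun x => x))
  · simpa using PySem.List.sorted_pairwise xs (fun x => x)
  · exact ((List.reverse_perm _).trans (PySem.List.sorted_perm xs _ true)).trans
      (PySem.List.sorted_perm xs _ false).symm

theorem pvU_le_length (S : List String) (vis : PySem.Set String) : pvU S vis ≤ S.length :=
  List.length_filter_le _ _

theorem pvBridge (adj : List (String × List String)) (S : List String)
    (Hcl : ∀ u c, c ∈ PySem.Dict.getD ⟨adj⟩ u [] → c ∈ S) :
    ∀ (g : Nat) (stk : List (String × Nat)) (vis : PySem.Set String) (lines : List String),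
      (∀ p ∈ stk, p.1 ∈ S) → stk.length + pvP adj S vis < g →
      pvGoB adj g stk vis lines
        = (stk.foldl (fun st p => pvGoA adj (S.length + 1) p.1 p.2 st) (vis, lines)).2 := by
  intro g
  induction g with
  | zero => intro stk vis lines _ h; omega
  | succ g ih =>
    intro stk vis lines hstk hphi
    match stk with
    | [] => rw [pvGoB]; rfl
    | (url, level) :: stk =>
      rw [pvGoB]
      by_cases hcv : PySem.Set.contains vis url = true
      · rw [if_pos hcv]
        rw [List.foldl_cons]
        have hA : pvGoA adj (S.length + 1) url level (vis, lines) = (vis, lines) := by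
          rw [pvGoA, if_pos hcv]
        rw [hA]
        apply ih stk vis lines (fun p hp => hstk p (List.mem_cons_of_mem _ hp))
        simp at hphi ⊢; omega
      · have hc : PySem.Set.contains vis url = false := by
          revert hcv; cases PySem.Set.contains vis url <;> simp
        rw [if_neg hcv]
        have hmemS : url ∈ S := hstk (url, level) (List.mem_cons_self ..)
        have hSpos : 1 ≤ S.length := List.length_pos_of_mem hmemS
        -- the pushed stack is the ascending children, then the old stack
        have hstk1 : (PySem.List.sorted (PySem.Dict.getD ⟨adj⟩ url []) (fun x => x) true).foldl
              (fun s c => (c, level + 1) :: s) stk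
            = (PySem.List.sorted (PySem.Dict.getD ⟨adj⟩ url []) (fun x => x) false).map
                (fun c => (c, level + 1)) ++ stk := by
          rw [pv_push_foldl, pv_sorted_rev_reverse]
        rw [hstk1]
        -- unfold the head call of A
        rw [List.foldl_cons]
        have hA : pvGoA adj (S.length + 1) url level (vis, lines)
            = (PySem.List.sorted (PySem.Dict.getD ⟨adj⟩ url []) (fun x => x) false).foldl
                (fun st c => pvGoA adj (S.length + 1) c (level + 1) st)
                (PySem.Set.add vis url, lines ++ [pvLine url level]) := by
          rw [pvGoA, if_neg hcv]
          apply pvGoA_fuel_foldl adj S Hcl _ _ _ _ _ (S.length - 1)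
            (fun c hcm => Hcl url c ((PySem.List.mem_sorted _ _ _ _).1 hcm))
          · show pvU S (PySem.Set.add vis url) ≤ S.length - 1
            have h1 := pvU_add_lt S vis url hmemS hc
            have h2 := pvU_le_length S vis
            omega
          · omega
          · omega
        rw [hA]
        have hmems : ∀ p ∈ (PySem.List.sorted (PySem.Dict.getD ⟨adj⟩ url []) (fun x => x) false).map
            (fun c => (c, level + 1)) ++ stk, p.1 ∈ S := by
          intro p hp
          rcases List.mem_append.1 hp with hmem | hmem
          · obtain ⟨c, hcm, rfl⟩ := List.mem_map.1 hmem
            exact Hcl url c ((PySem.List.mem_sorted _ _ _ _).1 hcm)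
          · exact hstk p (List.mem_cons_of_mem _ hmem)
        have hbound : ((PySem.List.sorted (PySem.Dict.getD ⟨adj⟩ url []) (fun x => x) false).map
              (fun c => (c, level + 1)) ++ stk).length
            + pvP adj S (PySem.Set.add vis url) < g := by
          have hp := pvP_add adj S vis url hmemS hc
          have hlen : (PySem.List.sorted (PySem.Dict.getD ⟨adj⟩ url []) (fun x => x) false).length
              = (PySem.Dict.getD ⟨adj⟩ url []).length :=
            (PySem.List.sorted_perm _ _ _).length_eq
          simp only [List.length_append, List.length_map, List.length_cons, hlen] at hphi ⊢
          omega
        rw [ih _ _ _ hmems hbound, List.foldl_append, pv_foldl_pairs]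

-- ===== VERDICT (by name: the statement is the Claim_ definition above) =====
theorem build_markdown_site_map_spec : Claim_equal_build_markdown_site_map := by
  intro base_url adjacency _
  unfold Spec_build_markdown_site_map
  have Hcl : ∀ u c, c ∈ PySem.Dict.getD ⟨adjacency⟩ u [] →
      c ∈ base_url :: adjacency.flatMap (·.2) :=
    fun u c h => List.mem_cons_of_mem _ (pv_getD_mem_flatMap adjacency u c h)
  show PySem.Str.join "\n"
      (pvGoA adjacency ((base_url :: adjacency.flatMap (·.2)).length + 1) base_url 0
        (PySem.Set.empty, ["# Site Map for " ++ base_url ++ "\n"])).2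
    = PySem.Str.join "\n"
      (pvGoB adjacency
        (2 + ((base_url :: adjacency.flatMap (·.2)).map
          (fun u => (PySem.Dict.getD ⟨adjacency⟩ u []).length)).sum)
        [(base_url, 0)] PySem.Set.empty ["# Site Map for " ++ base_url ++ "\n"])
  refine congrArg (PySem.Str.join "\n") ?_
  rw [pvBridge adjacency (base_url :: adjacency.flatMap (·.2)) Hcl _ _ _ _
        (by intro p hp; simp at hp; simp [hp])
        (by
          have hempty : pvP adjacency (base_url :: adjacency.flatMap (·.2)) PySem.Set.empty
              = ((base_url :: adjacency.flatMap (·.2)).map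
                  (fun u => (PySem.Dict.getD ⟨adjacency⟩ u []).length)).sum := by
            unfold pvP
            rw [List.filter_eq_self.2 (fun a _ => by rfl)]
          simp only [List.length_cons, List.length_nil, hempty]
          omega)]
  rfl
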